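-- pv_equiv track=rewrite | github.com/Hawyuscribe/newreader | django_neurology_mcq/mcq/cognitive_analysis.py | _get_treatment_side_effects
-- ===== SOURCE A (Python) =====
-- def _get_treatment_side_effects(options: dict) -> list:
--     """Get treatment side effects"""
--     side_effects = []
--     for option in options.values():
--         option_lower = option.lower()
--         if 'psychotherapy' in option_lower:
--             side_effects.append("Minimal")
--         elif 'propranolol' in option_lower:
--             side_effects.append("Fatigue, bradycardia")
--         elif any(drug in option_lower for drug in ['sertraline', 'ssri']):
--             side_effects.append("GI, sexual dysfunction")
--         else:
--             side_effects.append("Variable")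
--     return side_effects
-- ===== SOURCE B (Python) =====
-- # Reverse-priority staged overwrite: every rule rewrites the whole label list,
-- # lowest priority first, so the highest-priority match is written last.
-- _RULES_REVERSED = [
--     (('sertraline', 'ssri'), 'GI, sexual dysfunction'),
--     (('propranolol',), 'Fatigue, bradycardia'),
--     (('psychotherapy',), 'Minimal'),
-- ]
--
--
-- def _get_treatment_side_effects(options: dict) -> list:
--     """Get treatment side effects"""
--     texts = [v.lower() for v in options.values()]
--     labels = ['Variable'] * len(texts)
--     for keywords, label in _RULES_REVERSED:
--         labels = [label if any(k in t for k in keywords) else old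
--                   for t, old in zip(texts, labels)]
--     return labels
-- ===== Notes on version B (the rewrite author's own statement) =====
-- stated objective: alternative
-- what changed: Replaces the per-element first-match if/elif cascade with staged whole-list passes: all labels start as 'Variable' and each rule, applied in reverse priority order, overwrites the labels of matching options, so the highest-priority match wins by being written last.
import Mathlib
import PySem

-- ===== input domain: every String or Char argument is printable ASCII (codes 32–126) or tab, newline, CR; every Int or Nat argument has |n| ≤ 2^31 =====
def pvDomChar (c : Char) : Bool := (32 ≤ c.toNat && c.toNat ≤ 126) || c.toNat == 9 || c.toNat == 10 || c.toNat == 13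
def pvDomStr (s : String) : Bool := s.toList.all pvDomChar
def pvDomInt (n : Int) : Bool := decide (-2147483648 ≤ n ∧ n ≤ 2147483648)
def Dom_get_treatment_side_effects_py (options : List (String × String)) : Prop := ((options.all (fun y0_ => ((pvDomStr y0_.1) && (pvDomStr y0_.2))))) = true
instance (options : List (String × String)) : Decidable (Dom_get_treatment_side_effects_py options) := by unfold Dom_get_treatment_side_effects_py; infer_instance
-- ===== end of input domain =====

-- B replaces A's per-element if/elif cascade with staged whole-list passes: labels start as
-- "Variable" and each rule, applied in reverse priority order, overwrites the labels of
-- matching options (last writer = highest priority wins); objective: alternative.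

-- ===== PORT A =====
def get_treatment_side_effects_py (options : List (String × String)) : List String :=
  options.foldl (fun side_effects kv =>
    let option_lower := PySem.Str.lower kv.2
    if PySem.Str.isIn "psychotherapy" option_lower then
      side_effects ++ ["Minimal"]
    else if PySem.Str.isIn "propranolol" option_lower then
      side_effects ++ ["Fatigue, bradycardia"]
    else if ["sertraline", "ssri"].any (fun drug => PySem.Str.isIn drug option_lower) then
      side_effects ++ ["GI, sexual dysfunction"]
    else
      side_effects ++ ["Variable"]) []

-- ===== PORT B =====
def pvRulesReversed : List (List String × String) :=
  [(["sertraline", "ssri"], "GI, sexual dysfunction"),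
   (["propranolol"], "Fatigue, bradycardia"),
   (["psychotherapy"], "Minimal")]

def get_treatment_side_effects_py_alt (options : List (String × String)) : List String :=
  let texts := options.map (fun kv => PySem.Str.lower kv.2)
  pvRulesReversed.foldl (fun labels r =>
    (texts.zip labels).map (fun tl =>
      if r.1.any (fun k => PySem.Str.isIn k tl.1) then r.2 else tl.2))
    (texts.map (fun _ => "Variable"))

-- ===== PRECONDITION & SPEC =====
def Spec_get_treatment_side_effects_py (options : List (String × String)) (out : List String) : Prop := out = get_treatment_side_effects_py_alt options
instance (options : List (String × String)) (out : List String) : Decidable (Spec_get_treatment_side_effects_py options out) := by unfold Spec_get_treatment_side_effects_py; infer_instance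

-- ===== CLAIM =====
def Claim_equal_get_treatment_side_effects_py : Prop := ∀ (options : List (String × String)), Dom_get_treatment_side_effects_py options → Spec_get_treatment_side_effects_py options (get_treatment_side_effects_py options)

-- ===== LEMMAS AND PROOFS =====

-- one overwrite stage applied to a pointwise-mapped label list stays pointwise
theorem stage_map {α : Type} (texts : List α) (g : α → String)
    (p : α → Bool) (lab : String) :
    (texts.zip (texts.map g)).map (fun tl => if p tl.1 then lab else tl.2)
      = texts.map (fun t => if p t then lab else g t) := by
  induction texts with
  | nil => rfl
  | cons t rest ih => simp [ih]

-- B computes, per option, the reverse-priority cascade on the lowered text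
theorem alt_pointwise (options : List (String × String)) :
    get_treatment_side_effects_py_alt options
      = options.map (fun kv =>
          let low := PySem.Str.lower kv.2
          if PySem.Str.isIn "psychotherapy" low then "Minimal"
          else if PySem.Str.isIn "propranolol" low then "Fatigue, bradycardia"
          else if ["sertraline", "ssri"].any (fun k => PySem.Str.isIn k low) then
            "GI, sexual dysfunction"
          else "Variable") := by
  unfold get_treatment_side_effects_py_alt pvRulesReversed
  simp only [List.foldl_cons, List.foldl_nil]
  rw [stage_map (options.map (fun kv => PySem.Str.lower kv.2)) (fun _ => "Variable")
        (fun t => ["sertraline", "ssri"].any (fun k => PySem.Str.isIn k t)) "GI, sexual dysfunction",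
      stage_map (options.map (fun kv => PySem.Str.lower kv.2))
        (fun t => if ["sertraline", "ssri"].any (fun k => PySem.Str.isIn k t) then "GI, sexual dysfunction" else "Variable")
        (fun t => ["propranolol"].any (fun k => PySem.Str.isIn k t)) "Fatigue, bradycardia",
      stage_map (options.map (fun kv => PySem.Str.lower kv.2))
        (fun t => if ["propranolol"].any (fun k => PySem.Str.isIn k t) then "Fatigue, bradycardia"
                  else if ["sertraline", "ssri"].any (fun k => PySem.Str.isIn k t) then "GI, sexual dysfunction" else "Variable")
        (fun t => ["psychotherapy"].any (fun k => PySem.Str.isIn k t)) "Minimal",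
      List.map_map]
  simp [List.any]

theorem foldlA_eq (options : List (String × String)) (acc : List String) :
    options.foldl (fun side_effects kv =>
      let option_lower := PySem.Str.lower kv.2
      if PySem.Str.isIn "psychotherapy" option_lower then
        side_effects ++ ["Minimal"]
      else if PySem.Str.isIn "propranolol" option_lower then
        side_effects ++ ["Fatigue, bradycardia"]
      else if ["sertraline", "ssri"].any (fun drug => PySem.Str.isIn drug option_lower) then
        side_effects ++ ["GI, sexual dysfunction"]
      else
        side_effects ++ ["Variable"]) acc
    = acc ++ options.map (fun kv =>
        let low := PySem.Str.lower kv.2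
        if PySem.Str.isIn "psychotherapy" low then "Minimal"
        else if PySem.Str.isIn "propranolol" low then "Fatigue, bradycardia"
        else if ["sertraline", "ssri"].any (fun k => PySem.Str.isIn k low) then
          "GI, sexual dysfunction"
        else "Variable") := by
  induction options generalizing acc with
  | nil => simp
  | cons kv rest ih =>
    simp only [List.foldl_cons, List.map_cons, ih]
    split_ifs <;> simp

-- ===== VERDICT =====
theorem get_treatment_side_effects_py_spec : Claim_equal_get_treatment_side_effects_py := by
  intro options _
  unfold Spec_get_treatment_side_effects_py get_treatment_side_effects_py
  rw [alt_pointwise]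
  simpa using foldlA_eq options []
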